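-- pv_equiv track=rewrite | github.com/Reha-Mohammad/cli-productivity-manager | smart_rules.py | suggest_priority
-- ===== SOURCE A (Python) =====
-- def suggest_priority(title, description=""):
--     text = f"{title} {description}".lower()
--
--     high_keywords = [
--         "urgent", "asap", "deadline", "thesis", "exam", "interview",
--         "submit", "final", "important", "critical"
--     ]
--
--     medium_keywords = [
--         "study", "prepare", "review", "write", "update", "fix", "meeting"
--     ]
--
--     if any(word in text for word in high_keywords):
--         return "high"
--     if any(word in text for word in medium_keywords):
--         return "medium"
--     return "low"
-- ===== SOURCE B (Python) =====
-- _HIGH = ("urgent", "asap", "deadline", "thesis", "exam", "interview",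
--          "submit", "final", "important", "critical")
-- _MEDIUM = ("study", "prepare", "review", "write", "update", "fix", "meeting")
--
--
-- def suggest_priority(title, description=""):
--     # Position-driven scan: walk the text once; at each position test which
--     # keyword starts there (startswith), instead of keyword-driven 'in' passes.
--     text = f"{title} {description}".lower()
--     found_medium = False
--     for i in range(len(text)):
--         if any(text.startswith(w, i) for w in _HIGH):
--             return "high"
--         if not found_medium and any(text.startswith(w, i) for w in _MEDIUM):
--             found_medium = True
--     return "medium" if found_medium else "low"
-- ===== Notes on version B (the rewrite author's own statement) =====
-- stated objective: alternative
-- what changed: Replaces A's keyword-driven substring containment passes by a text-position-driven single scan: walk the text positions once, testing with startswith which keywords begin at each position, returning the high label immediately on a high match and remembering medium matches in a flag.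
import Mathlib
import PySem

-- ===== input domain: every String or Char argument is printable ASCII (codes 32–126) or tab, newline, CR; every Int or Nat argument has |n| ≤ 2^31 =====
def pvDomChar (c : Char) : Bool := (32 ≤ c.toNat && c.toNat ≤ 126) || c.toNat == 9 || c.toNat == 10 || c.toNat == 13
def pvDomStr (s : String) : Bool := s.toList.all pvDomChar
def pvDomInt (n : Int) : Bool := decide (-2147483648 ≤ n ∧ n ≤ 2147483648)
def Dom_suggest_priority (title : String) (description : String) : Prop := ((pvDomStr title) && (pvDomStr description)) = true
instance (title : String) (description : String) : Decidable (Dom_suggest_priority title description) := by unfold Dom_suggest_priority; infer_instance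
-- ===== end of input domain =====

-- B replaces A's keyword-driven substring ('in') passes by one text-position-driven
-- scan testing startswith at each position (objective: alternative).

-- ===== PORT A =====
def pvHighKeywords : List String :=
  ["urgent", "asap", "deadline", "thesis", "exam", "interview",
   "submit", "final", "important", "critical"]

def pvMediumKeywords : List String :=
  ["study", "prepare", "review", "write", "update", "fix", "meeting"]

def suggest_priority (title : String) (description : String) : String :=
  let text := PySem.Str.lower (title ++ " " ++ description)
  if pvHighKeywords.any (fun word => PySem.Str.isIn word text) then "high"
  else if pvMediumKeywords.any (fun word => PySem.Str.isIn word text) then "medium"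
  else "low"

-- ===== PORT B =====
-- the loop 'for i in range(len(text)): …' as structural recursion over the
-- suffix text[i:] (text.startswith(w, i) is 'startswith' on that suffix)
def pvScan (foundMedium : Bool) : List Char → String
  | [] => if foundMedium then "medium" else "low"
  | c :: rest =>
      if pvHighKeywords.any (fun w => PySem.Chars.startswith (c :: rest) w.toList) then "high"
      else pvScan
        (foundMedium || pvMediumKeywords.any (fun w => PySem.Chars.startswith (c :: rest) w.toList))
        rest

def suggest_priority_alt (title : String) (description : String) : String :=
  let text := PySem.Str.lower (title ++ " " ++ description)
  pvScan false text.toList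

-- ===== PRECONDITION & SPEC =====
def Spec_suggest_priority (title : String) (description : String) (out : String) : Prop := out = suggest_priority_alt title description
instance (title : String) (description : String) (out : String) : Decidable (Spec_suggest_priority title description out) := by unfold Spec_suggest_priority; infer_instance

-- ===== CLAIM (what is proved, stated in full; the proofs are below) =====
def Claim_equal_suggest_priority : Prop := ∀ (title : String) (description : String), Dom_suggest_priority title description → Spec_suggest_priority title description (suggest_priority title description)

-- ===== LEMMAS AND PROOFS =====

-- 'sub in s' splits at the head: sub occurs in c :: t iff it starts there or occurs in t
theorem pvIsIn_cons (sub : List Char) (c : Char) (t : List Char) :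
    PySem.Chars.isIn sub (c :: t)
      = (PySem.Chars.startswith (c :: t) sub || PySem.Chars.isIn sub t) := by
  rw [Bool.eq_iff_iff]
  simp [PySem.Chars.isIn_iff_infix, PySem.Chars.startswith_iff, List.infix_cons_iff]

-- any over a disjunction of tests splits (no library name closes this form)
theorem pvAny_or {α : Type} (l : List α) (p q : α → Bool) :
    (l.any (fun x => p x || q x)) = (l.any p || l.any q) := by
  induction l with
  | nil => rfl
  | cons x xs ih => simp [List.any_cons, ih, Bool.or_assoc, Bool.or_left_comm]

-- the scan computes A's two any()-tests on the remaining suffix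
theorem pvScan_eq (s : List Char) (fm : Bool) :
    pvScan fm s
      = if pvHighKeywords.any (fun w => PySem.Chars.isIn w.toList s) then "high"
        else if fm || pvMediumKeywords.any (fun w => PySem.Chars.isIn w.toList s) then "medium"
        else "low" := by
  induction s generalizing fm with
  | nil => cases fm <;> simp [pvScan] <;> decide
  | cons c t ih =>
    simp only [pvScan, ih, pvIsIn_cons, pvAny_or]
    cases pvHighKeywords.any (fun w => PySem.Chars.startswith (c :: t) w.toList) <;>
      cases pvHighKeywords.any (fun w => PySem.Chars.isIn w.toList t) <;>
      cases pvMediumKeywords.any (fun w => PySem.Chars.startswith (c :: t) w.toList) <;>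
      cases pvMediumKeywords.any (fun w => PySem.Chars.isIn w.toList t) <;>
      cases fm <;> simp

-- ===== VERDICT (by name: the statement is the Claim_ definition above) =====
theorem suggest_priority_spec : Claim_equal_suggest_priority := by
  intro title description _
  unfold Spec_suggest_priority suggest_priority suggest_priority_alt
  dsimp only
  rw [pvScan_eq]
  simp only [Bool.false_or, PySem.Str.isIn]
  rfl
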